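-- pv_equiv track=rewrite | github.com/saraevrom/RecoV2 | transform/matrices.py | estimate_shape
-- ===== SOURCE A (Python) =====
-- from typing import List, Any
--
-- def estimate_shape(data:List[List[Any]]):
--     if len(data)==0:
--         return 0,0
--     else:
--         rows = len(data)
--         columns = len(data[0])
--         for row in data:
--             if len(row)!=columns:
--                 return None
--         return rows,columns
-- ===== SOURCE B (Python) =====
-- def estimate_shape(data):
--     # Recursive decomposition: compute the shape of the tail, then extend it by
--     # one row, checking the new row against the tail's column count.
--     if len(data) == 0:
--         return 0, 0
--     if len(data) == 1:
--         return 1, len(data[0])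
--     sub = estimate_shape(data[1:])
--     if sub is None or sub[1] != len(data[0]):
--         return None
--     return sub[0] + 1, sub[1]
-- ===== Notes on version B (the rewrite author's own statement) =====
-- stated objective: alternative
-- what changed: Replaces the iterative compare-every-row-against-the-first-row early-exit loop with structural recursion that computes the tail's shape and extends it by one row, building the row count bottom-up instead of taking len(data) up front.
import Mathlib
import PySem

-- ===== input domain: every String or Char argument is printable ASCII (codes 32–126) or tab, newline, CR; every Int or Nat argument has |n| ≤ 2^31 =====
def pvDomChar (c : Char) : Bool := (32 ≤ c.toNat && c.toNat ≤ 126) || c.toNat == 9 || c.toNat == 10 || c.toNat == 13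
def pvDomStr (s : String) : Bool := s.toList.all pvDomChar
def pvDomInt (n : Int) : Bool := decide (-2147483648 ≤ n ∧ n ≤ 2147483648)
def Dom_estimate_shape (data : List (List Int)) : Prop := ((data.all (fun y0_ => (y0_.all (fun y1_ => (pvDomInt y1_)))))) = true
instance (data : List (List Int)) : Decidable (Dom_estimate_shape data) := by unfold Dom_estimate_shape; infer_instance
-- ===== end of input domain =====

-- B replaces A's iterative first-row-comparison loop by structural recursion that computes
-- the tail's shape and extends it by one row (row count built bottom-up); same asymptotic cost.

-- ===== PORT A =====
-- the 'for row in data: if len(row)!=columns: return None' loop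
def estimateShapeLoop (rows columns : Int) : List (List Int) → Option (Int × Int)
  | [] => some (rows, columns)
  | row :: rest =>
      if (row.length : Int) ≠ columns then none
      else estimateShapeLoop rows columns rest

def estimate_shape (data : List (List Int)) : Option (Int × Int) :=
  if data.length = 0 then some (0, 0)
  else
    let rows : Int := data.length
    let columns : Int := (data.headD []).length   -- data[0]; data is nonempty here
    estimateShapeLoop rows columns data

-- ===== PORT B =====
def estimate_shape_alt : List (List Int) → Option (Int × Int)
  | [] => some (0, 0)
  | [r] => some (1, (r.length : Int))
  | r :: s :: rest =>
      match estimate_shape_alt (s :: rest) with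
      | none => none
      | some (n, c) => if c ≠ (r.length : Int) then none else some (n + 1, c)

-- ===== PRECONDITION & SPEC =====
def Spec_estimate_shape (data : List (List Int)) (out : Option (Int × Int)) : Prop := out = estimate_shape_alt data
instance (data : List (List Int)) (out : Option (Int × Int)) : Decidable (Spec_estimate_shape data out) := by unfold Spec_estimate_shape; infer_instance

-- ===== CLAIM (what is proved, stated in full; the proofs are below) =====
def Claim_equal_estimate_shape : Prop := ∀ (data : List (List Int)), Dom_estimate_shape data → Spec_estimate_shape data (estimate_shape data)

-- ===== LEMMAS AND PROOFS =====

-- A's loop returns some (rows, columns) iff every row has length `columns`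
theorem estimateShapeLoop_eq (rows columns : Int) (l : List (List Int)) :
    estimateShapeLoop rows columns l =
      if l.all (fun r => (r.length : Int) = columns) then some (rows, columns) else none := by
  induction l with
  | nil => simp [estimateShapeLoop]
  | cons row rest ih =>
      by_cases h : (row.length : Int) = columns <;>
        simp [estimateShapeLoop, h, ih]

-- characterisation of B's recursion on a nonempty list
theorem alt_cons_eq (r : List Int) (rest : List (List Int)) :
    estimate_shape_alt (r :: rest) =
      if rest.all (fun x => (x.length : Int) = r.length) then
        some (((r :: rest).length : Int), (r.length : Int))
      else none := by
  induction rest generalizing r with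
  | nil => simp [estimate_shape_alt]
  | cons s rest' ih =>
      rw [show estimate_shape_alt (r :: s :: rest') =
            (match estimate_shape_alt (s :: rest') with
             | none => none
             | some (n, c) => if c ≠ (r.length : Int) then none else some (n + 1, c))
          from rfl, ih s]
      by_cases hall : ∀ x ∈ rest', x.length = s.length
      · by_cases hsr : s.length = r.length
        · have h2 : ∀ x ∈ s :: rest', x.length = r.length :=
            List.forall_mem_cons.mpr ⟨hsr, fun x hx => (hall x hx).trans hsr⟩
          have hsr' : (s.length : Int) = (r.length : Int) := by exact_mod_cast hsr
          simp only [List.all_eq_true, decide_eq_true_eq, Nat.cast_inj, List.length_cons]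
          rw [if_pos hall, if_pos h2]
          simp [hsr']
        · have h3 : ¬ ∀ x ∈ s :: rest', x.length = r.length := by
            intro h; exact hsr (h s (List.mem_cons_self))
          have hsr' : ¬ (s.length : Int) = (r.length : Int) := by exact_mod_cast hsr
          simp only [List.all_eq_true, decide_eq_true_eq, Nat.cast_inj, List.length_cons]
          rw [if_pos hall, if_neg h3]
          simp [hsr']
      · have h3 : ¬ ∀ x ∈ s :: rest', x.length = r.length := by
          intro h
          exact hall fun x hx =>
            (h x (List.mem_cons_of_mem s hx)).trans (h s List.mem_cons_self).symm
        simp only [List.all_eq_true, decide_eq_true_eq, Nat.cast_inj, List.length_cons]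
        rw [if_neg hall, if_neg h3]

-- ===== VERDICT (by name: the statement is the Claim_ definition above) =====
theorem estimate_shape_spec : Claim_equal_estimate_shape := by
  intro data _
  unfold Spec_estimate_shape estimate_shape
  cases data with
  | nil => simp [estimate_shape_alt]
  | cons r rest =>
      simp only [List.length_cons, List.headD_cons]
      rw [estimateShapeLoop_eq, alt_cons_eq]
      simp
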